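-- pv_equiv track=rewrite | github.com/franklinharper/wordle-words | consonant_sequences.py | find_three_consonant_sequences
-- ===== SOURCE A (Python) =====
-- VOWELS = set("aeiou")
--
-- def is_consonant(ch):
--     return ch.isalpha() and ch not in VOWELS
--
-- def find_three_consonant_sequences(word):
--     """Yield every 3-letter consonant substring found in *word*."""
--     seq = []
--     for ch in word:
--         if is_consonant(ch):
--             seq.append(ch)
--             if len(seq) >= 3:
--                 yield "".join(seq[-3:])
--         else:
--             seq = []
-- ===== SOURCE B (Python) =====
-- VOWELS = set("aeiou")
--
-- def find_three_consonant_sequences(word):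
--     """Yield every 3-letter consonant substring found in *word*."""
--     run = ""
--     for ch in word:
--         if ch.isalpha() and ch not in VOWELS:
--             run += ch
--         else:
--             for i in range(len(run) - 2):
--                 yield run[i:i + 3]
--             run = ""
--     for i in range(len(run) - 2):
--         yield run[i:i + 3]
-- ===== Notes on version B (the rewrite author's own statement) =====
-- stated objective: alternative
-- what changed: B accumulates each maximal consonant run as a string and, only when the run ends (or at end of word), emits all its length-3 sliding windows with an inner range loop, instead of A's emit-as-you-go tail-slice of a growing char list.
import Mathlib
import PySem

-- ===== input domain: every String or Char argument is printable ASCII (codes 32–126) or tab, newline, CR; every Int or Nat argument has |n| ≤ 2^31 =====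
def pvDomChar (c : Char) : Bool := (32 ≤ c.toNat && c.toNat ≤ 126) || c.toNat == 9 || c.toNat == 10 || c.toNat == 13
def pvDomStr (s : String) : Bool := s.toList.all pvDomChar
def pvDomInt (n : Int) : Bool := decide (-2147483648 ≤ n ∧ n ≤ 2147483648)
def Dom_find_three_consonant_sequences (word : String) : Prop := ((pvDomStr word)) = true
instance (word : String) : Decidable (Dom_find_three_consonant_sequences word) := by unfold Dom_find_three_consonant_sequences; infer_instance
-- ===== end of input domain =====

-- B collects each maximal consonant run and windows it on flush, instead of A's emit-as-you-go tail slice; alternative decomposition, same cost.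

-- ===== PORT A =====
-- VOWELS = set("aeiou")
def pvVOWELS : PySem.Set Char := PySem.Set.ofList "aeiou".toList

-- is_consonant(ch) = ch.isalpha() and ch not in VOWELS
def pvIsConsonant (ch : Char) : Bool :=
  PySem.Chars.isalpha ch && !(PySem.Set.contains pvVOWELS ch)

-- generator: list of yielded values; seq is the list of consonant chars; "".join(seq[-3:]) on
-- single chars = String.mk of the char-list slice (exact)
def find_three_consonant_sequences (word : String) : List String :=
  (word.toList.foldl
    (fun (st : List Char × List String) ch =>
      if pvIsConsonant ch then
        let seq := st.1 ++ [ch]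
        (seq,
          if 3 ≤ seq.length then
            st.2 ++ [String.mk (PySem.List.slice seq (some (-3)) none)]
          else st.2)
      else ([], st.2))
    ([], [])).2

-- ===== PORT B =====
-- inner loop: for i in range(len(run) - 2): yield run[i:i+3]
def pvWindows (run : List Char) : List String :=
  (PySem.List.pyRange 0 ((run.length : Int) - 2) 1).map
    (fun i => String.mk (PySem.List.slice run (some i) (some (i + 3))))

def find_three_consonant_sequences_alt (word : String) : List String :=
  let st := word.toList.foldl
    (fun (st : List String × List Char) ch =>
      if PySem.Chars.isalpha ch && !(PySem.Set.contains pvVOWELS ch) then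
        (st.1, st.2 ++ [ch])
      else (st.1 ++ pvWindows st.2, []))
    ([], [])
  st.1 ++ pvWindows st.2

-- ===== PRECONDITION & SPEC =====
def Spec_find_three_consonant_sequences (word : String) (out : List String) : Prop := out = find_three_consonant_sequences_alt word
instance (word : String) (out : List String) : Decidable (Spec_find_three_consonant_sequences word out) := by unfold Spec_find_three_consonant_sequences; infer_instance

-- ===== CLAIM (what is proved, stated in full; the proofs are below) =====
def Claim_equal_find_three_consonant_sequences : Prop := ∀ (word : String), Dom_find_three_consonant_sequences word → Spec_find_three_consonant_sequences word (find_three_consonant_sequences word)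

-- ===== LEMMAS AND PROOFS =====

-- windows as a pure Nat-indexed map
def pvWins (run : List Char) : List String :=
  (List.range (run.length - 2)).map (fun k => String.mk ((run.drop k).take 3))

lemma pvWindows_eq_wins (run : List Char) : pvWindows run = pvWins run := by
  unfold pvWindows pvWins
  rw [PySem.List.pyRange_one, List.map_map]
  have hn : (((run.length : Int) - 2) - 0).toNat = run.length - 2 := by omega
  rw [hn]
  refine List.map_congr_left (fun k hk => ?_)
  simp only [Function.comp]
  have : (0 : Int) + (k : Int) = (k : Int) := by ring
  rw [this]
  have h3 : (k : Int) + 3 = (k : Int) + ((3 : Nat) : Int) := by norm_num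
  rw [h3, PySem.List.slice_natCast_add]

lemma pvWins_nil : pvWins [] = [] := rfl

lemma pvWins_snoc (run : List Char) (c : Char) :
    pvWins (run ++ [c]) =
      pvWins run ++
        (if 3 ≤ (run ++ [c]).length then
          [String.mk (PySem.List.slice (run ++ [c]) (some (-3)) none)] else []) := by
  have hs : PySem.List.slice (run ++ [c]) (some (-3)) none
      = (run ++ [c]).drop ((run ++ [c]).length - 3) :=
    PySem.List.slice_from_neg_ofNat (run ++ [c]) 3 (by omega)
  rw [hs]
  unfold pvWins
  rcases Nat.lt_or_ge run.length 2 with h | h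
  · have h1 : run.length - 2 = 0 := by omega
    have h2 : (run ++ [c]).length - 2 = 0 := by simp; omega
    rw [h1, h2, if_neg (show ¬ 3 ≤ (run ++ [c]).length by simp; omega)]
    simp
  · have hlen : (run ++ [c]).length = run.length + 1 := by simp
    have h2 : (run ++ [c]).length - 2 = (run.length - 2) + 1 := by omega
    rw [h2, List.range_succ, List.map_append]
    have hmap : (List.range (run.length - 2)).map
        (fun k => String.mk (((run ++ [c]).drop k).take 3)) =
        (List.range (run.length - 2)).map (fun k => String.mk ((run.drop k).take 3)) := by
      refine List.map_congr_left (fun k hk => ?_)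
      rw [List.mem_range] at hk
      rw [List.drop_append_of_le_length (by omega)]
      rw [List.take_append_of_le_length (by simp; omega)]
    rw [hmap]
    congr 1
    have hif : 3 ≤ (run ++ [c]).length := by omega
    rw [if_pos hif]
    simp only [List.map_cons, List.map_nil]
    congr 2
    have hdl : ((run ++ [c]).drop (run.length - 2)).length = 3 := by
      rw [List.length_drop]; omega
    rw [← hdl, List.take_length]
    congr 1
    omega

-- the two loop bodies
def pvStepA (st : List Char × List String) (ch : Char) : List Char × List String :=
  if pvIsConsonant ch then
    let seq := st.1 ++ [ch]
    (seq,
      if 3 ≤ seq.length then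
        st.2 ++ [String.mk (PySem.List.slice seq (some (-3)) none)]
      else st.2)
  else ([], st.2)

def pvStepB (st : List String × List Char) (ch : Char) : List String × List Char :=
  if PySem.Chars.isalpha ch && !(PySem.Set.contains pvVOWELS ch) then
    (st.1, st.2 ++ [ch])
  else (st.1 ++ pvWindows st.2, [])

lemma pv_loop_eq (l : List Char) : ∀ (run : List Char) (acc : List String),
    l.foldl pvStepA (run, acc ++ pvWins run)
      = ((l.foldl pvStepB (acc, run)).2, (l.foldl pvStepB (acc, run)).1 ++ pvWins (l.foldl pvStepB (acc, run)).2) := by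
  induction l with
  | nil => intro run acc; simp
  | cons c l ih =>
    intro run acc
    simp only [List.foldl_cons]
    by_cases hc : pvIsConsonant c
    · have hb : (PySem.Chars.isalpha c && !(PySem.Set.contains pvVOWELS c)) = true := hc
      rw [show pvStepA (run, acc ++ pvWins run) c = (run ++ [c], acc ++ pvWins (run ++ [c])) from by
        simp only [pvStepA, if_pos hc]
        rw [pvWins_snoc]
        split_ifs <;> simp]
      rw [show pvStepB (acc, run) c = (acc, run ++ [c]) from by
        simp only [pvStepB, hb]; simp]
      exact ih (run ++ [c]) acc
    · have hb : (PySem.Chars.isalpha c && !(PySem.Set.contains pvVOWELS c)) = false := by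
        simpa [pvIsConsonant] using hc
      rw [show pvStepA (run, acc ++ pvWins run) c = ([], (acc ++ pvWins run) ++ pvWins ([] : List Char)) from by
        simp only [pvStepA, if_neg hc, pvWins_nil]; simp]
      rw [show pvStepB (acc, run) c = (acc ++ pvWindows run, []) from by
        simp only [pvStepB, hb]; simp]
      rw [pvWindows_eq_wins]
      exact ih [] (acc ++ pvWins run)

-- ===== VERDICT (by name: the statement is the Claim_ definition above) =====
theorem find_three_consonant_sequences_spec : Claim_equal_find_three_consonant_sequences := by
  intro word _
  unfold Spec_find_three_consonant_sequences
  unfold find_three_consonant_sequences find_three_consonant_sequences_alt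
  have hA : (fun (st : List Char × List String) ch =>
      if pvIsConsonant ch then
        let seq := st.1 ++ [ch]
        (seq,
          if 3 ≤ seq.length then
            st.2 ++ [String.mk (PySem.List.slice seq (some (-3)) none)]
          else st.2)
      else ([], st.2)) = pvStepA := rfl
  have hB : (fun (st : List String × List Char) ch =>
      if PySem.Chars.isalpha ch && !(PySem.Set.contains pvVOWELS ch) then
        (st.1, st.2 ++ [ch])
      else (st.1 ++ pvWindows st.2, [])) = pvStepB := rfl
  rw [hA, hB]
  have h := pv_loop_eq word.toList [] []
  simp only [pvWins_nil, List.append_nil] at h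
  rw [h]
  simp only [pvWindows_eq_wins]
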